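-- pv_equiv track=rewrite | github.com/binderlabs/BugHound-MCP | bughound/core/pattern_analyzer.py | _detect_application_type
-- ===== SOURCE A (Python) =====
-- from typing import Dict, List, Any, Optional, Tuple
--
-- def _detect_application_type(subdomains: List[str], technologies: List[str]) -> str:
--     """Detect application type based on patterns"""
--     subdomain_str = " ".join(subdomains).lower()
--     tech_str = " ".join(technologies).lower()
--
--     if any(word in subdomain_str for word in ["shop", "store", "cart", "payment"]):
--         return "E-commerce Platform"
--     elif any(word in subdomain_str for word in ["api", "microservice", "service"]):
--         return "API/Microservices Platform"
--     elif any(word in subdomain_str for word in ["blog", "cms", "wp"]):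
--         return "Content Management System"
--     elif any(word in subdomain_str for word in ["mail", "smtp", "imap"]):
--         return "Email/Communication Platform"
--     elif "jenkins" in tech_str or "gitlab" in tech_str or "ci" in subdomain_str:
--         return "Development/CI-CD Platform"
--     else:
--         return "Web Application"
-- ===== SOURCE B (Python) =====
-- _LABELS = [
--     "E-commerce Platform",
--     "API/Microservices Platform",
--     "Content Management System",
--     "Email/Communication Platform",
--     "Development/CI-CD Platform",
--     "Web Application",
-- ]
--
-- _SUBDOMAIN_RANKS = [
--     ("shop", 0), ("store", 0), ("cart", 0), ("payment", 0),
--     ("api", 1), ("microservice", 1), ("service", 1),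
--     ("blog", 2), ("cms", 2), ("wp", 2),
--     ("mail", 3), ("smtp", 3), ("imap", 3),
--     ("ci", 4),
-- ]
--
-- _TECH_RANKS = [("jenkins", 4), ("gitlab", 4)]
--
--
-- def _detect_application_type(subdomains, technologies):
--     """Detect application type: minimum-rank aggregation over keyword hits."""
--     subdomain_str = " ".join(subdomains).lower()
--     tech_str = " ".join(technologies).lower()
--     best = 5  # rank of the default label
--     for kw, rank in _SUBDOMAIN_RANKS:
--         if kw in subdomain_str and rank < best:
--             best = rank
--     for kw, rank in _TECH_RANKS:
--         if kw in tech_str and rank < best: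
--             best = rank
--     return _LABELS[best]
-- ===== Notes on version B (the rewrite author's own statement) =====
-- stated objective: alternative
-- what changed: Replaces A's early-return if/elif chain of any() membership tests by a minimum-rank aggregation: a single accumulator pass over all (keyword, rank) pairs keeps the smallest rank whose keyword occurs, then indexes a label table with the best rank.
import Mathlib
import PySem

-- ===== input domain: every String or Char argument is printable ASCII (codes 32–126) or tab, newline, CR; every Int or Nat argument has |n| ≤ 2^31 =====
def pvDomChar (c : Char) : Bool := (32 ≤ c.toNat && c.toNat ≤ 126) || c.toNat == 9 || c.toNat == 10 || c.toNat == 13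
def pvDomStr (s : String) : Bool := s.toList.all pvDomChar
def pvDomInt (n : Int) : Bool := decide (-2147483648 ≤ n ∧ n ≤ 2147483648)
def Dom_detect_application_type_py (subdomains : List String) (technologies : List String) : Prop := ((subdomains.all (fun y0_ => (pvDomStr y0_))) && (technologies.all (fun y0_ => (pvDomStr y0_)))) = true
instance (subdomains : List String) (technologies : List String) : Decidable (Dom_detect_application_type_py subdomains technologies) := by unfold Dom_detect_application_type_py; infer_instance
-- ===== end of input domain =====

-- B replaces A's early-return if/elif chain by a minimum-rank aggregation: one pass over all
-- (keyword, rank) pairs keeps the smallest matching rank, then indexes a label table (alternative decomposition; same cost).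

-- ===== PORT A =====
def detect_application_type_py (subdomains : List String) (technologies : List String) : String :=
  let subdomain_str := PySem.Str.lower (PySem.Str.join " " subdomains)
  let tech_str := PySem.Str.lower (PySem.Str.join " " technologies)
  if ["shop", "store", "cart", "payment"].any (fun word => PySem.Str.isIn word subdomain_str) then
    "E-commerce Platform"
  else if ["api", "microservice", "service"].any (fun word => PySem.Str.isIn word subdomain_str) then
    "API/Microservices Platform"
  else if ["blog", "cms", "wp"].any (fun word => PySem.Str.isIn word subdomain_str) then
    "Content Management System"
  else if ["mail", "smtp", "imap"].any (fun word => PySem.Str.isIn word subdomain_str) then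
    "Email/Communication Platform"
  else if PySem.Str.isIn "jenkins" tech_str || PySem.Str.isIn "gitlab" tech_str || PySem.Str.isIn "ci" subdomain_str then
    "Development/CI-CD Platform"
  else
    "Web Application"

-- ===== PORT B =====
def pvLabels : List String :=
  [ "E-commerce Platform", "API/Microservices Platform", "Content Management System",
    "Email/Communication Platform", "Development/CI-CD Platform", "Web Application" ]

def pvSubRanks : List (String × Nat) :=
  [ ("shop", 0), ("store", 0), ("cart", 0), ("payment", 0),
    ("api", 1), ("microservice", 1), ("service", 1),
    ("blog", 2), ("cms", 2), ("wp", 2),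
    ("mail", 3), ("smtp", 3), ("imap", 3),
    ("ci", 4) ]

def pvTechRanks : List (String × Nat) := [("jenkins", 4), ("gitlab", 4)]

-- the two accumulator loops of Source B: keep the smallest rank whose keyword occurs
def pvBestRank (s : String) (pairs : List (String × Nat)) (start : Nat) : Nat :=
  pairs.foldl (fun best kr => if PySem.Str.isIn kr.1 s && decide (kr.2 < best) then kr.2 else best) start

def detect_application_type_py_alt (subdomains : List String) (technologies : List String) : String :=
  let subdomain_str := PySem.Str.lower (PySem.Str.join " " subdomains)
  let tech_str := PySem.Str.lower (PySem.Str.join " " technologies)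
  let best := pvBestRank subdomain_str pvSubRanks 5
  let best := pvBestRank tech_str pvTechRanks best
  pvLabels.getD best ""   -- _LABELS[best]; best ≤ 5 always, so the index is always in range

-- ===== PRECONDITION & SPEC =====
def Spec_detect_application_type_py (subdomains : List String) (technologies : List String) (out : String) : Prop := out = detect_application_type_py_alt subdomains technologies
instance (subdomains : List String) (technologies : List String) (out : String) : Decidable (Spec_detect_application_type_py subdomains technologies out) := by unfold Spec_detect_application_type_py; infer_instance

-- ===== CLAIM (what is proved, stated in full; the proofs are below) =====
def Claim_equal_detect_application_type_py : Prop := ∀ (subdomains : List String) (technologies : List String), Dom_detect_application_type_py subdomains technologies → Spec_detect_application_type_py subdomains technologies (detect_application_type_py subdomains technologies)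

-- ===== LEMMAS AND PROOFS =====
theorem pvBestRank_append (s : String) (p q : List (String × Nat)) (st : Nat) :
    pvBestRank s (p ++ q) st = pvBestRank s q (pvBestRank s p st) := by
  simp [pvBestRank, List.foldl_append]

theorem pvBestRank_group (s : String) (r : Nat) (ks : List String) (st : Nat) :
    pvBestRank s (ks.map (fun k => (k, r))) st =
      if ks.any (fun k => PySem.Str.isIn k s) && decide (r < st) then r else st := by
  induction ks generalizing st with
  | nil => simp [pvBestRank]
  | cons k tl ih =>
    simp only [List.map_cons, pvBestRank, List.foldl_cons, List.any_cons] at *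
    rw [ih]
    by_cases h1 : (PySem.Str.isIn k s && decide (r < st)) = true
    · have h1' := h1
      rw [Bool.and_eq_true] at h1'
      rw [if_pos h1]
      have hrr : decide (r < r) = false := by simp
      simp only [h1'.1, h1'.2, hrr, Bool.and_false, Bool.true_and, Bool.true_or, ite_self,
        if_true, Bool.false_eq_true]
    · rw [if_neg h1]
      by_cases hr : decide (r < st) = true
      · have hk : PySem.Str.isIn k s = false := by
          rcases Bool.eq_false_or_eq_true (PySem.Str.isIn k s) with h | h
          all_goals first | exact h | exact absurd (by rw [h, hr]; rfl) h1
        simp only [hk, Bool.false_or]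
      · have hrf : decide (r < st) = false := by
          rcases Bool.eq_false_or_eq_true (decide (r < st)) with h | h
          all_goals first | exact h | exact absurd h hr
        simp only [hrf, Bool.and_false, Bool.false_eq_true, if_false]

-- ===== VERDICT (by name: the statement is the Claim_ definition above) =====
theorem detect_application_type_py_spec : Claim_equal_detect_application_type_py := by
  intro subdomains technologies _
  unfold Spec_detect_application_type_py
  simp only [detect_application_type_py, detect_application_type_py_alt]
  rw [show pvSubRanks =
        (["shop", "store", "cart", "payment"].map (fun k => (k, 0))) ++
        ((["api", "microservice", "service"].map (fun k => (k, 1))) ++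
        ((["blog", "cms", "wp"].map (fun k => (k, 2))) ++
        ((["mail", "smtp", "imap"].map (fun k => (k, 3))) ++
        (["ci"].map (fun k => (k, 4)))))) from rfl,
      show pvTechRanks = ["jenkins", "gitlab"].map (fun k => (k, 4)) from rfl,
      pvBestRank_append, pvBestRank_append, pvBestRank_append, pvBestRank_append,
      pvBestRank_group, pvBestRank_group, pvBestRank_group, pvBestRank_group,
      pvBestRank_group, pvBestRank_group]
  simp only [List.any_cons, List.any_nil, Bool.or_false]
  generalize PySem.Str.isIn "shop" _ = b1
  generalize PySem.Str.isIn "store" _ = b2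
  generalize PySem.Str.isIn "cart" _ = b3
  generalize PySem.Str.isIn "payment" _ = b4
  generalize PySem.Str.isIn "api" _ = b5
  generalize PySem.Str.isIn "microservice" _ = b6
  generalize PySem.Str.isIn "service" _ = b7
  generalize PySem.Str.isIn "blog" _ = b8
  generalize PySem.Str.isIn "cms" _ = b9
  generalize PySem.Str.isIn "wp" _ = b10
  generalize PySem.Str.isIn "mail" _ = b11
  generalize PySem.Str.isIn "smtp" _ = b12
  generalize PySem.Str.isIn "imap" _ = b13
  generalize PySem.Str.isIn "jenkins" _ = b14
  generalize PySem.Str.isIn "gitlab" _ = b15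
  generalize PySem.Str.isIn "ci" _ = b16
  generalize (b1 || (b2 || (b3 || b4))) = c1
  generalize (b5 || (b6 || b7)) = c2
  generalize (b8 || (b9 || b10)) = c3
  generalize (b11 || (b12 || b13)) = c4
  generalize (b14 || b15) = c5
  revert c1 c2 c3 c4 c5 b16
  decide
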